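-- pv_equiv track=rewrite | github.com/verebelyin/vibe-quant | vibe_quant/dsl/parser.py | _find_yaml_line_number
-- ===== SOURCE A (Python) =====
-- def _find_yaml_line_number(yaml_str: str, key_path: list[str]) -> int | None:
--     """Attempt to find line number for a YAML key path.
--
--     This is a best-effort function that scans the YAML for the key.
--
--     Args:
--         yaml_str: Raw YAML string
--         key_path: Path of keys to find (e.g., ["indicators", "rsi"])
--
--     Returns:
--         Line number (1-indexed) or None if not found
--     """
--     lines = yaml_str.splitlines()
--     current_indent = -1
--     path_index = 0
--
--     for i, line in enumerate(lines, start=1):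
--         stripped = line.lstrip()
--         if not stripped or stripped.startswith("#"):
--             continue
--
--         indent = len(line) - len(stripped)
--
--         # Check if this line starts a key we're looking for
--         if path_index < len(key_path):
--             target_key = key_path[path_index]
--             is_target_key = stripped.startswith(f"{target_key}:")
--             valid_indent = indent > current_indent or (path_index == 0 and indent == 0)
--             if is_target_key and valid_indent:
--                 current_indent = indent
--                 path_index += 1
--                 if path_index == len(key_path):
--                     return i
--
--     return None
-- ===== SOURCE B (Python) =====
-- def _find_yaml_line_number(yaml_str: str, key_path: list[str]) -> int | None:
--     """Find the 1-indexed line of a YAML key path (best effort).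
--
--     Two-stage design: first tokenize the document into records
--     (line number, indent, stripped text) for the significant lines only,
--     then a recursion over the key path consumes the record list.
--     """
--     entries = []
--     for lineno, line in enumerate(yaml_str.splitlines(), start=1):
--         s = line.lstrip()
--         if s and not s.startswith("#"):
--             entries.append((lineno, len(line) - len(s), s))
--
--     def locate(keys, records, indent):
--         if not keys:
--             return None
--         target = keys[0] + ":"
--         for idx, (lineno, ind, s) in enumerate(records):
--             if s.startswith(target) and ind > indent:
--                 if len(keys) == 1:
--                     return lineno
--                 return locate(keys[1:], records[idx + 1:], ind)
--         return None
--
--     return locate(key_path, entries, -1)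
-- ===== Notes on version B (the rewrite author's own statement) =====
-- stated objective: alternative
-- what changed: Replaces A's single fused loop with mutable current_indent/path_index counters by a staged design: a tokenizing pass builds a record list (line number, indent, stripped text) of the significant lines, and a separate recursion over the key path consumes that record list, slicing past each match.
import Mathlib
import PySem

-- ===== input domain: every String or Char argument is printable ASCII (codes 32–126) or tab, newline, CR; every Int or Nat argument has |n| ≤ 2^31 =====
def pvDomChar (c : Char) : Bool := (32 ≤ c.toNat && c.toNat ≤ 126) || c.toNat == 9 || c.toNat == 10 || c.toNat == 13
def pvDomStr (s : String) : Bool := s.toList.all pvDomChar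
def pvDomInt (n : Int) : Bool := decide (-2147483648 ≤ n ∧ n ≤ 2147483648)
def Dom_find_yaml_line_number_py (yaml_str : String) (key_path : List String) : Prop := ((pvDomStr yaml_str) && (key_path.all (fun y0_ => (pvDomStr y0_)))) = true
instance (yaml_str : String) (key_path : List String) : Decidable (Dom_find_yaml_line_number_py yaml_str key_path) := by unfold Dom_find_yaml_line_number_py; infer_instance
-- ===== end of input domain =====

-- B replaces A's fused stateful loop by two stages — a tokenizing pass building
-- (line number, indent, stripped text) records, then a recursion over the key path
-- consuming that record list (objective: alternative decomposition).

-- ===== PORT A =====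
-- the for-loop over enumerate(lines, 1) with mutable current_indent / path_index and early return
def pvAGo (key_path : List String) : List String → Int → Int → Nat → Option Int
  | [], _, _, _ => none
  | line :: rest, i, current_indent, path_index =>
    let stripped := PySem.Str.lstrip line
    if stripped = "" ∨ PySem.Str.startswith stripped "#" = true then
      pvAGo key_path rest (i + 1) current_indent path_index
    else
      let indent : Int := PySem.Str.len line - PySem.Str.len stripped
      if path_index < key_path.length then
        let target_key := key_path.getD path_index ""
        if PySem.Str.startswith stripped (target_key ++ ":") = true ∧
            (indent > current_indent ∨ (path_index = 0 ∧ indent = 0)) then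
          if path_index + 1 = key_path.length then some i
          else pvAGo key_path rest (i + 1) indent (path_index + 1)
        else pvAGo key_path rest (i + 1) current_indent path_index
      else pvAGo key_path rest (i + 1) current_indent path_index

def find_yaml_line_number_py (yaml_str : String) (key_path : List String) : Option Int :=
  pvAGo key_path (PySem.Str.splitlines yaml_str) 1 (-1) 0

-- ===== PORT B =====
-- stage 1: tokenize the lines (enumerated from start index i) into records
-- (line number, indent, stripped text) of the significant lines only
def pvTokenize : List String → Int → List (Int × Int × String)
  | [], _ => []
  | line :: rest, i =>
    let s := PySem.Str.lstrip line
    if s = "" ∨ PySem.Str.startswith s "#" = true then pvTokenize rest (i + 1)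
    else (i, PySem.Str.len line - PySem.Str.len s, s) :: pvTokenize rest (i + 1)

-- stage 2: recursion over the key path; the inner for over records becomes a
-- structural scan (records[idx+1:] is the tail at the match)
def pvLocate : List String → List (Int × Int × String) → Int → Option Int
  | [], _, _ => none
  | _ :: _, [], _ => none
  | k :: ks, (lineno, ind, s) :: rest, indent =>
    if PySem.Str.startswith s (k ++ ":") = true ∧ ind > indent then
      if ks = [] then some lineno else pvLocate ks rest ind
    else pvLocate (k :: ks) rest indent

def find_yaml_line_number_py_alt (yaml_str : String) (key_path : List String) : Option Int :=
  pvLocate key_path (pvTokenize (PySem.Str.splitlines yaml_str) 1) (-1)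

-- ===== PRECONDITION & SPEC =====
def Spec_find_yaml_line_number_py (yaml_str : String) (key_path : List String) (out : Option Int) : Prop := out = find_yaml_line_number_py_alt yaml_str key_path
instance (yaml_str : String) (key_path : List String) (out : Option Int) : Decidable (Spec_find_yaml_line_number_py yaml_str key_path out) := by unfold Spec_find_yaml_line_number_py; infer_instance

-- ===== CLAIM (what is proved, stated in full; the proofs are below) =====
def Claim_equal_find_yaml_line_number_py : Prop := ∀ (yaml_str : String) (key_path : List String), Dom_find_yaml_line_number_py yaml_str key_path → Spec_find_yaml_line_number_py yaml_str key_path (find_yaml_line_number_py yaml_str key_path)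

-- ===== LEMMAS AND PROOFS =====

-- stripping only removes characters, so the indent len(line) - len(stripped) is ≥ 0
theorem pv_lstrip_len_le (s : String) : PySem.Str.len (PySem.Str.lstrip s) ≤ PySem.Str.len s := by
  simp only [PySem.Str.len, PySem.Str.toList_lstrip, PySem.Chars.lstrip]
  exact_mod_cast (List.dropWhile_sublist _).length_le

theorem pvAGo_nil_path (lines : List String) (i ci : Int) (pi : Nat) :
    pvAGo [] lines i ci pi = none := by
  induction lines generalizing i with
  | nil => simp [pvAGo]
  | cons l rest ih =>
    simp only [pvAGo, List.length_nil]
    split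
    · exact ih _
    · simpa using ih (i + 1)

-- A's single fused loop equals B's staged tokenize-then-locate recursion, for any
-- shared state with pi < |kp| and "at the first key the current indent is still -1"
theorem pvAGo_eq_locate (kp : List String) (lines : List String) (i ci : Int) (pi : Nat)
    (hpi : pi < kp.length) (hci : pi = 0 → ci = -1) :
    pvAGo kp lines i ci pi = pvLocate (kp.drop pi) (pvTokenize lines i) ci := by
  induction lines generalizing i ci pi with
  | nil =>
    obtain ⟨k, ks, h⟩ : ∃ k ks, kp.drop pi = k :: ks := ⟨_, _, List.drop_eq_getElem_cons hpi⟩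
    simp [pvAGo, pvTokenize, h, pvLocate]
  | cons line rest ih =>
    simp only [pvAGo, pvTokenize]
    by_cases hblank : PySem.Str.lstrip line = "" ∨ PySem.Str.startswith (PySem.Str.lstrip line) "#" = true
    · simp only [if_pos hblank]
      exact ih (i + 1) ci pi hpi hci
    · simp only [if_neg hblank, if_pos hpi]
      rw [List.drop_eq_getElem_cons hpi]
      simp only [pvLocate]
      have hgetD : kp.getD pi "" = kp[pi] := List.getD_eq_getElem kp "" hpi
      have hindent : (0 : Int) ≤ PySem.Str.len line - PySem.Str.len (PySem.Str.lstrip line) := by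
        have := pv_lstrip_len_le line; omega
      rw [hgetD]
      by_cases hmatch : PySem.Str.startswith (PySem.Str.lstrip line) (kp[pi] ++ ":") = true ∧
          PySem.Str.len line - PySem.Str.len (PySem.Str.lstrip line) > ci
      · have hA : PySem.Str.startswith (PySem.Str.lstrip line) (kp[pi] ++ ":") = true ∧
            (PySem.Str.len line - PySem.Str.len (PySem.Str.lstrip line) > ci ∨
             (pi = 0 ∧ PySem.Str.len line - PySem.Str.len (PySem.Str.lstrip line) = 0)) :=
          ⟨hmatch.1, Or.inl hmatch.2⟩
        simp only [if_pos hA, if_pos hmatch]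
        by_cases hlast : pi + 1 = kp.length
        · have hnil : kp.drop (pi + 1) = [] := List.drop_eq_nil_of_le (by omega)
          simp [if_pos hlast, hnil]
        · have hlt : pi + 1 < kp.length := by omega
          have hne : kp.drop (pi + 1) ≠ [] := by
            simp [List.drop_eq_nil_iff]; omega
          simp only [if_neg hlast, if_neg hne]
          exact ih (i + 1) _ (pi + 1) hlt (by omega)
      · have hA : ¬ (PySem.Str.startswith (PySem.Str.lstrip line) (kp[pi] ++ ":") = true ∧
            (PySem.Str.len line - PySem.Str.len (PySem.Str.lstrip line) > ci ∨
             (pi = 0 ∧ PySem.Str.len line - PySem.Str.len (PySem.Str.lstrip line) = 0))) := by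
          rintro ⟨h1, h2 | ⟨h0, hz⟩⟩
          · exact hmatch ⟨h1, h2⟩
          · exact hmatch ⟨h1, by rw [hz]; have := hci h0; omega⟩
        simp only [if_neg hA, if_neg hmatch]
        rw [ih (i + 1) ci pi hpi hci, List.drop_eq_getElem_cons hpi]

-- ===== VERDICT (by name: the statement is the Claim_ definition above) =====
theorem find_yaml_line_number_py_spec : Claim_equal_find_yaml_line_number_py := by
  intro yaml_str key_path _
  unfold Spec_find_yaml_line_number_py find_yaml_line_number_py find_yaml_line_number_py_alt
  match key_path with
  | [] =>
    have : ∀ recs, pvLocate [] recs (-1) = (none : Option Int) := fun recs => by cases recs <;> rfl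
    simp [pvAGo_nil_path, this]
  | k :: ks =>
    exact pvAGo_eq_locate (k :: ks) _ 1 (-1) 0 (by simp) (fun _ => rfl)
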